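-- pv_equiv track=rewrite | github.com/Park-HC/TIL | Promgraming Basic/Python/String/intermediate_string01.py | mk_pattern
-- ===== SOURCE A (Python) =====
-- def mk_pattern(small_str):
--
--     pattern = small_str
--
--     for i in range(5, 0, -1):
--         if len(small_str) < i:
--             continue
--
--         pattern = small_str[-i: ]
--         k = True
--
--         for j in range(len(pattern) - 1):
--             if pattern[j] in pattern[j+1:]:
--                 break
--         else:
--             break
--
--     return pattern
-- ===== SOURCE B (Python) =====
-- def mk_pattern(small_str):
--     seen = set()
--     count = 0
--     for ch in reversed(small_str):
--         if count == 5 or ch in seen: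
--             break
--         seen.add(ch)
--         count += 1
--     return small_str[len(small_str) - count:]
-- ===== Notes on version B (the rewrite author's own statement) =====
-- stated objective: simpler
-- what changed: One greedy right-to-left pass with a seen-set and a counter (stop at a repeated char or count 5) replaces A's descending search over suffix lengths 5..1 with a quadratic duplicate scan of each candidate suffix.
import Mathlib
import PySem

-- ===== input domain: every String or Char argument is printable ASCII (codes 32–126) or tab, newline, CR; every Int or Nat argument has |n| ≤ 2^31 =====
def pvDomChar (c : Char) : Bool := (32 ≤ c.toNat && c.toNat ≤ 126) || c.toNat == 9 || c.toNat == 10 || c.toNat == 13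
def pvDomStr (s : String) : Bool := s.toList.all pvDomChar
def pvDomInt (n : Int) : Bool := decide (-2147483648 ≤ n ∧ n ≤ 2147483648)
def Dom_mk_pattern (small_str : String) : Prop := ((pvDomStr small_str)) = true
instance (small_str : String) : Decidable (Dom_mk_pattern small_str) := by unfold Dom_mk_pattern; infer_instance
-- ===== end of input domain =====

-- B replaces A's descending scan over the suffix lengths 5..1 (each candidate suffix
-- re-checked for duplicates) by one greedy right-to-left pass with a seen-set; objective: simpler.

-- ===== PORT A =====
-- inner loop: 'for j in range(len(pattern)-1): if pattern[j] in pattern[j+1:]: break' —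
-- true iff some j triggers the break (the loop carries no other state)
def mkDupScan (pattern : List Char) : Bool :=
  (PySem.List.pyRange 0 ((pattern.length : Int) - 1) 1).any fun j =>
    match PySem.List.pyGet? pattern j with
    | some c => decide (c ∈ PySem.List.slice pattern (some (j + 1)) none)
    | none => false

-- outer loop over 'range(5, 0, -1)', with both Python 'break's as early returns
def mkPatternLoop (s : List Char) : List Int → List Char → List Char
  | [], pattern => pattern
  | i :: rest, pattern =>
    if (s.length : Int) < i then mkPatternLoop s rest pattern
    else
      let pat := PySem.List.slice s (some (-i)) none
      if mkDupScan pat then mkPatternLoop s rest pat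
      else pat

def mk_pattern (small_str : String) : String :=
  String.ofList (mkPatternLoop small_str.toList (PySem.List.pyRange 5 0 (-1)) small_str.toList)

-- ===== PORT B =====
-- greedy pass over reversed(small_str): stop at count 5 or a repeated char
def mkAltCount : List Char → PySem.Set Char → Nat → Nat
  | [], _, count => count
  | c :: rest, seen, count =>
    if count == 5 || PySem.Set.contains seen c then count
    else mkAltCount rest (PySem.Set.add seen c) (count + 1)

def mk_pattern_alt (small_str : String) : String :=
  let s := small_str.toList
  let count := mkAltCount s.reverse PySem.Set.empty 0
  String.ofList (PySem.List.slice s (some ((s.length : Int) - (count : Int))) none)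

-- ===== PRECONDITION & SPEC =====
def Spec_mk_pattern (small_str : String) (out : String) : Prop := out = mk_pattern_alt small_str
instance (small_str : String) (out : String) : Decidable (Spec_mk_pattern small_str out) := by unfold Spec_mk_pattern; infer_instance

-- ===== CLAIM (what is proved, stated in full; the proofs are below) =====
def Claim_equal_mk_pattern : Prop := ∀ (small_str : String), Dom_mk_pattern small_str → Spec_mk_pattern small_str (mk_pattern small_str)

-- ===== LEMMAS AND PROOFS =====

-- the inner duplicate scan, unrolled by one character
lemma mkDupScan_cons (c : Char) (t : List Char) :
    mkDupScan (c :: t) = (decide (c ∈ t) || mkDupScan t) := by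
  unfold mkDupScan
  simp only [List.length_cons]
  have hb : ((t.length + 1 : Nat) : Int) - 1 = ((t.length : Nat) : Int) := by push_cast; ring
  rw [hb, PySem.List.pyRange_one, PySem.List.pyRange_one]
  cases t with
  | nil => simp
  | cons d u =>
    have h1 : ((((d :: u).length : Nat) : Int) - 0).toNat = u.length + 1 := by simp
    have h2 : ((((d :: u).length : Nat) : Int) - 1 - 0).toNat = u.length := by simp
    rw [h1, h2, List.range_succ_eq_map]
    simp only [List.map_cons, List.any_cons, List.map_map, List.any_map]
    congr 1
    · norm_num
      have e0 : (1 : Int) = ((1 : Nat) : Int) := by norm_num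
      rw [e0, PySem.List.slice_from_natCast]
      simp
    · refine List.any_congr rfl (fun k => ?_)
      simp only [Function.comp]
      have e1 : (0 : Int) + ((k.succ : Nat) : Int) = ((k + 1 : Nat) : Int) := by push_cast; ring
      have e2 : (0 : Int) + ((k : Nat) : Int) = ((k : Nat) : Int) := by ring
      simp only [e1, e2]
      have e3 : ((k + 1 : Nat) : Int) + 1 = ((k + 2 : Nat) : Int) := by push_cast; ring
      have e4 : ((k : Nat) : Int) + 1 = ((k + 1 : Nat) : Int) := by push_cast; ring
      simp only [e3, e4, PySem.List.slice_from_natCast, PySem.List.pyGet?_natCast]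
      simp
      cases hg : (d :: u)[k]? <;> simp

-- the inner scan is exactly the (negated) Nodup predicate
lemma mkDupScan_eq (l : List Char) : mkDupScan l = !decide l.Nodup := by
  induction l with
  | nil => decide
  | cons c t ih =>
    rw [mkDupScan_cons, ih]
    by_cases h : c ∈ t <;> simp [h, List.nodup_cons]

-- distinctness of prefixes is downward closed
lemma take_nodup_le (r : List Char) (a b : Nat) (hab : a ≤ b) (h : (r.take b).Nodup) :
    (r.take a).Nodup := by
  have : r.take a = (r.take b).take a := by
    rw [List.take_take]; simp [hab]
  rw [this]
  exact h.sublist (List.take_sublist _ _)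

-- greedy invariant: from a distinct processed prefix t (the seen set, in insertion order),
-- mkAltCount returns a count m with t.length ≤ m ≤ min 5 (total length), the first m
-- characters distinct, and maximal so unless it hit a cap
lemma mkAltCount_inv (r : List Char) : ∀ (t : List Char), t.Nodup → t.length ≤ 5 →
    (t.length ≤ mkAltCount r t t.length ∧ mkAltCount r t t.length ≤ 5 ∧
     mkAltCount r t t.length ≤ t.length + r.length ∧
     ((t ++ r).take (mkAltCount r t t.length)).Nodup ∧
     (mkAltCount r t t.length < 5 → mkAltCount r t t.length < t.length + r.length →
        ¬ ((t ++ r).take (mkAltCount r t t.length + 1)).Nodup)) := by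
  induction r with
  | nil =>
    intro t hnd h5
    simp only [mkAltCount, List.append_nil, List.length_nil, Nat.add_zero, List.take_length]
    exact ⟨le_refl _, h5, le_refl _, hnd, fun _ h => absurd h (lt_irrefl _)⟩
  | cons c rest ih =>
    intro t hnd h5
    simp only [mkAltCount]
    by_cases h5e : t.length = 5
    · simp only [h5e, beq_self_eq_true, Bool.true_or, if_true]
      refine ⟨le_refl _, by omega, by omega, ?_, fun h _ => by omega⟩
      rw [← h5e, List.take_left]
      exact hnd
    · by_cases hc : c ∈ t
      · have hcon : PySem.Set.contains t c = true := by
          simp [PySem.Set.contains]; exact hc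
        simp only [hcon, Bool.or_true, if_true]
        refine ⟨le_refl _, h5, by simp, ?_, fun _ _ => ?_⟩
        · rw [List.take_left]; exact hnd
        · have he : (t ++ c :: rest).take (t.length + 1) = t ++ [c] := by
            rw [List.take_append]; simp
          rw [he, ← List.concat_eq_append, List.nodup_concat]
          rintro ⟨hcn, -⟩
          exact hcn hc
      · have hcon : PySem.Set.contains t c = false := by
          simpa [PySem.Set.contains] using hc
        have h55 : (t.length == 5) = false := by simp [h5e]
        simp only [hcon, h55, Bool.or_false, if_false, Bool.false_eq_true]
        have hadd : PySem.Set.add t c = t ++ [c] := by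
          unfold PySem.Set.add
          rw [hcon]
          simp
        have hlen : t.length + 1 = (t ++ [c]).length := by simp
        rw [hadd, hlen]
        have hnd' : (t ++ [c]).Nodup := by
          rw [← List.concat_eq_append, List.nodup_concat]
          exact ⟨hc, hnd⟩
        have h5' : (t ++ [c]).length ≤ 5 := by
          simp; omega
        have := ih (t ++ [c]) hnd' h5'
        have happ : (t ++ [c]) ++ rest = t ++ c :: rest := by simp
        rw [happ] at this
        have hlen2 : (t ++ [c]).length + rest.length = t.length + (c :: rest).length := by
          simp; omega
        rw [hlen2] at this
        obtain ⟨a1, a2, a3, a4, a5⟩ := this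
        exact ⟨le_trans (by simp) a1, a2, a3, a4, a5⟩

-- B's count is Nat.findGreatest of "the first c chars of the reversed string are distinct"
lemma mkAltCount_eq_findGreatest (r : List Char) :
    mkAltCount r PySem.Set.empty 0 =
      Nat.findGreatest (fun c => (r.take c).Nodup ∧ c ≤ r.length) 5 := by
  have h0 : (PySem.Set.empty : PySem.Set Char) = ([] : List Char) := rfl
  have hl : (0 : Nat) = ([] : List Char).length := rfl
  have := mkAltCount_inv r [] (by simp) (by simp)
  simp only [List.nil_append, List.length_nil, Nat.zero_add] at this
  obtain ⟨_, h5, hlen, hnd, hmax⟩ := this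
  rw [h0]
  symm
  rw [Nat.findGreatest_eq_iff]
  refine ⟨h5, fun _ => ⟨hnd, hlen⟩, fun n hmn hn5 => ?_⟩
  rintro ⟨hndn, hnlen⟩
  have hm5 : mkAltCount r [] 0 < 5 := lt_of_lt_of_le hmn hn5
  have hmr : mkAltCount r [] 0 < r.length := lt_of_lt_of_le hmn hnlen
  exact hmax hm5 hmr (take_nodup_le r _ n hmn hndn)

-- the length-m suffix of s is the reversed length-m prefix of s.reverse
lemma drop_eq_reverse_take (s : List Char) (m : Nat) :
    s.drop (s.length - m) = (s.reverse.take m).reverse := by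
  rw [List.reverse_take]; simp

-- take 1 is always duplicate-free
lemma take_one_nodup (r : List Char) : (r.take 1).Nodup := by
  cases r <;> simp

-- the descending index list [k, k-1, ..., 1] that A's outer loop traverses
def descList : Nat → List Int
  | 0 => []
  | k + 1 => ((k + 1 : Nat) : Int) :: descList k

-- A's outer loop returns the longest distinct suffix of length ≤ k (as findGreatest)
lemma mkPatternLoop_eq (s : List Char) : ∀ (k : Nat), 1 ≤ k → 1 ≤ s.length → ∀ (pat : List Char),
    mkPatternLoop s (descList k) pat =
      s.drop (s.length - Nat.findGreatest (fun c => (s.reverse.take c).Nodup ∧ c ≤ s.length) k) := by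
  intro k
  induction k with
  | zero => intro hk; omega
  | succ k ih =>
    intro _ hn pat
    simp only [descList, mkPatternLoop]
    rw [Nat.findGreatest_succ]
    by_cases hg : s.length < k + 1
    · have hgi : ((s.length : Nat) : Int) < ((k + 1 : Nat) : Int) := by exact_mod_cast hg
      rw [if_pos hgi]
      have hp : ¬ ((s.reverse.take (k + 1)).Nodup ∧ k + 1 ≤ s.length) := by
        rintro ⟨_, h⟩; omega
      rw [if_neg hp]
      exact ih (by omega) hn pat
    · have hgi : ¬ (((s.length : Nat) : Int) < ((k + 1 : Nat) : Int)) := by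
        rw [Int.not_lt]; rw [Nat.not_lt] at hg; exact_mod_cast hg
      rw [if_neg hgi]
      have hsl : PySem.List.slice s (some (-((k + 1 : Nat) : Int))) none
          = s.drop (s.length - (k + 1)) :=
        PySem.List.slice_from_neg_natCast s (k + 1) (by omega)
      have hrev : s.drop (s.length - (k + 1)) = (s.reverse.take (k + 1)).reverse :=
        drop_eq_reverse_take s (k + 1)
      by_cases hnd : (s.reverse.take (k + 1)).Nodup
      · have : mkDupScan (PySem.List.slice s (some (-((k + 1 : Nat) : Int))) none) = false := by
          rw [hsl, hrev, mkDupScan_eq]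
          simp [hnd]
        rw [this]
        simp only [Bool.false_eq_true, if_false]
        rw [if_pos ⟨hnd, by omega⟩]
        exact hsl
      · have : mkDupScan (PySem.List.slice s (some (-((k + 1 : Nat) : Int))) none) = true := by
          rw [hsl, hrev, mkDupScan_eq]
          simp [hnd]
        rw [this]
        simp only [if_true]
        have hp : ¬ ((s.reverse.take (k + 1)).Nodup ∧ k + 1 ≤ s.length) := by
          rintro ⟨h, _⟩; exact hnd h
        rw [if_neg hp]
        have hk1 : 1 ≤ k := by
          by_contra hk0
          have : k = 0 := by omega
          subst this
          exact hnd (take_one_nodup s.reverse)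
        exact ih hk1 hn _

lemma pyRange_desc : PySem.List.pyRange 5 0 (-1) = descList 5 := by decide

-- ===== VERDICT (by name: the statement is the Claim_ definition above) =====
theorem mk_pattern_spec : Claim_equal_mk_pattern := by
  intro small_str _
  simp only [Spec_mk_pattern, mk_pattern, mk_pattern_alt]
  by_cases hs : small_str.toList = []
  · rw [hs]
    decide
  · have hn : 1 ≤ small_str.toList.length := by
      cases h : small_str.toList with
      | nil => exact absurd h hs
      | cons a t => simp
    have hAC := mkAltCount_eq_findGreatest small_str.toList.reverse
    rw [List.length_reverse] at hAC
    rw [pyRange_desc, mkPatternLoop_eq small_str.toList 5 (by omega) hn, ← hAC]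
    have hinv := mkAltCount_inv small_str.toList.reverse [] (by simp) (by simp)
    have hgle : mkAltCount small_str.toList.reverse PySem.Set.empty 0 ≤ small_str.toList.length := by
      have := hinv.2.2.1
      simpa using this
    have hsl : PySem.List.slice small_str.toList
        (some ((small_str.toList.length : Int) - (mkAltCount small_str.toList.reverse PySem.Set.empty 0 : Int))) none
        = small_str.toList.drop (small_str.toList.length - mkAltCount small_str.toList.reverse PySem.Set.empty 0) := by
      rw [PySem.List.slice_from _ (by omega : (0:Int) ≤ (small_str.toList.length : Int) - (mkAltCount small_str.toList.reverse PySem.Set.empty 0 : Int))]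
      congr 1
      omega
    rw [hsl]
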